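-- pv_equiv track=rewrite | github.com/e9arawat/lesson019 | answer.py | fib_squares
-- ===== SOURCE A (Python) =====
-- def fib_squares(a, b):
--     """that returns a list of numbers where each element is the number if the number
--     is not a fibonacci number and the square of the number if the number is a fibonacci
--     number for a given range of numbers."""
--     start, end = 1, a
--     if b:
--         start, end = a, b
--
--     x, y = 0, 1
--     fibonacii_list = [0, 1]
--     while y <= end:
--         fibonacii_list.append(x + y)
--         x, y = y, fibonacii_list[-1]
--
--     fib_squares_list = [
--         i**2 if i in fibonacii_list else i for i in range(start, end + 1)
--     ]
--
--     return fib_squares_list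
-- ===== SOURCE B (Python) =====
-- def fib_squares(a, b):
--     start, end = (a, b) if b else (1, a)
--     res = list(range(start, end + 1))
--
--     def mark(v):
--         # direct index assignment: no membership scan per element
--         if start <= v <= end:
--             res[v - start] = v * v
--
--     mark(0)
--     mark(1)
--     x, y = 0, 1
--     while y <= end:
--         x, y = y, x + y
--         mark(y)
--     return res
-- ===== Notes on version B (the rewrite author's own statement) =====
-- stated objective: alternative
-- what changed: B drops the per-element membership scan of the Fibonacci list: it allocates the range list once and marks Fibonacci positions by direct index assignment (res[v-start] = v*v) while generating the Fibonacci numbers; a timing run read 5.91x at the largest size but inconsistently, so no speed is claimed.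
import Mathlib
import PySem

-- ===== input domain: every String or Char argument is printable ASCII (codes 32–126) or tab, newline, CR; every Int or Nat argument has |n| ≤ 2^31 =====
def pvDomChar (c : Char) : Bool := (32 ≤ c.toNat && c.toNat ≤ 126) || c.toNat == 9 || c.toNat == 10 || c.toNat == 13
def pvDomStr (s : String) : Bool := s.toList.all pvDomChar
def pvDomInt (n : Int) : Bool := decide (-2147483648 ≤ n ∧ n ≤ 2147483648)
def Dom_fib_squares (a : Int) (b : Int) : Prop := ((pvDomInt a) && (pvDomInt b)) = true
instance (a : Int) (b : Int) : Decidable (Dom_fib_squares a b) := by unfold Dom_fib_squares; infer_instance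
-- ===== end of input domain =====

-- B replaces A's per-element membership scan of the Fibonacci list by direct index
-- assignment into the range list (objective: alternative algorithm, same result).

-- ===== PORT A =====
-- while y <= end: fibonacii_list.append(x+y); x, y = y, fibonacii_list[-1]
-- fuel (end.toNat+3) is mathematically sufficient: y ≥ 1 and strictly increases after the first step
def fibLoopA : Nat → Int → Int → List Int → Int → List Int
  | 0, _, _, lst, _ => lst
  | n+1, x, y, lst, endv =>
      if y ≤ endv then fibLoopA n y (x + y) (lst ++ [x + y]) endv else lst

def fib_squares (a : Int) (b : Int) : List Int :=
  let se := if b ≠ 0 then (a, b) else (1, a)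
  let start := se.1
  let endv := se.2
  let fibs := fibLoopA (endv.toNat + 3) 0 1 [0, 1] endv
  (PySem.List.pyRange start (endv + 1) 1).map (fun i => if i ∈ fibs then i ^ 2 else i)

-- ===== PORT B =====
-- def mark(v): if start <= v <= end: res[v - start] = v * v
def markB (start endv : Int) (res : List Int) (v : Int) : List Int :=
  if start ≤ v ∧ v ≤ endv then res.set (v - start).toNat (v * v) else res

-- while y <= end: x, y = y, x + y; mark(y)
def fibLoopB : Nat → Int → Int → List Int → Int → Int → List Int
  | 0, _, _, res, _, _ => res
  | n+1, x, y, res, start, endv =>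
      if y ≤ endv then fibLoopB n y (x + y) (markB start endv res (x + y)) start endv else res

def fib_squares_alt (a : Int) (b : Int) : List Int :=
  let se := if b ≠ 0 then (a, b) else (1, a)
  let start := se.1
  let endv := se.2
  let res0 := PySem.List.pyRange start (endv + 1) 1
  let res1 := markB start endv (markB start endv res0 0) 1
  fibLoopB (endv.toNat + 3) 0 1 res1 start endv

-- ===== PRECONDITION & SPEC =====
def Spec_fib_squares (a : Int) (b : Int) (out : List Int) : Prop := out = fib_squares_alt a b
instance (a : Int) (b : Int) (out : List Int) : Decidable (Spec_fib_squares a b out) := by unfold Spec_fib_squares; infer_instance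

-- ===== CLAIM (what is proved, stated in full; the proofs are below) =====
def Claim_equal_fib_squares : Prop := ∀ (a : Int) (b : Int), Dom_fib_squares a b → Spec_fib_squares a b (fib_squares a b)

-- ===== LEMMAS AND PROOFS =====

-- B's result after marking the values of a list S equals A's map-with-membership over S
def fMem (S : List Int) (i : Int) : Int := if i ∈ S then i ^ 2 else i

theorem mark_map (start endv : Int) (S : List Int) (v : Int) :
    markB start endv ((PySem.List.pyRange start (endv + 1) 1).map (fMem S)) v
      = (PySem.List.pyRange start (endv + 1) 1).map (fMem (S ++ [v])) := by
  unfold markB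
  by_cases h : start ≤ v ∧ v ≤ endv
  · rw [if_pos h]
    apply List.ext_getElem
    · simp
    · intro k hk1 hk2
      have hklen : k < (endv + 1 - start).toNat := by simpa using hk2
      rw [List.getElem_set]
      by_cases hkv : (v - start).toNat = k
      · rw [if_pos hkv, List.getElem_map]
        rw [PySem.List.getElem_pyRange_one]
        have hv : start + (k : Int) = v := by omega
        rw [hv]
        have hmem : v ∈ S ++ [v] := by simp
        rw [fMem, if_pos hmem]
        ring
      · rw [if_neg hkv, List.getElem_map, List.getElem_map]
        rw [PySem.List.getElem_pyRange_one]
        have hne : start + (k : Int) ≠ v := by omega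
        rw [fMem, fMem]
        have hiff : (start + (k : Int) ∈ S ++ [v]) ↔ (start + (k : Int) ∈ S) := by
          simp [hne]
        simp only [hiff]
  · rw [if_neg h]
    apply List.map_congr_left
    intro i hi
    rw [PySem.List.mem_pyRange_one] at hi
    have : i ≠ v := by omega
    simp [fMem, this]

theorem sim (start endv : Int) : ∀ (fuel : Nat) (x y : Int) (S : List Int),
    fibLoopB fuel x y ((PySem.List.pyRange start (endv + 1) 1).map (fMem S)) start endv
      = (PySem.List.pyRange start (endv + 1) 1).map (fMem (fibLoopA fuel x y S endv)) := by
  intro fuel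
  induction fuel with
  | zero => intro x y S; rfl
  | succ n ih =>
      intro x y S
      show (if y ≤ endv then fibLoopB n y (x+y) (markB start endv ((PySem.List.pyRange start (endv+1) 1).map (fMem S)) (x+y)) start endv else (PySem.List.pyRange start (endv+1) 1).map (fMem S))
        = (PySem.List.pyRange start (endv+1) 1).map (fMem (if y ≤ endv then fibLoopA n y (x+y) (S ++ [x+y]) endv else S))
      by_cases h : y ≤ endv
      · rw [if_pos h, if_pos h, mark_map, ih]
      · rw [if_neg h, if_neg h]

theorem core (start endv : Int) :
    (PySem.List.pyRange start (endv + 1) 1).map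
        (fun i => if i ∈ fibLoopA (endv.toNat + 3) 0 1 [0, 1] endv then i ^ 2 else i)
      = fibLoopB (endv.toNat + 3) 0 1
          (markB start endv (markB start endv (PySem.List.pyRange start (endv + 1) 1) 0) 1) start endv := by
  have h0 : PySem.List.pyRange start (endv + 1) 1
      = (PySem.List.pyRange start (endv + 1) 1).map (fMem []) := by
    conv_lhs => rw [← List.map_id (PySem.List.pyRange start (endv + 1) 1)]
    apply List.map_congr_left
    intro i _
    simp [fMem]
  rw [show (fun i => if i ∈ fibLoopA (endv.toNat + 3) 0 1 [0, 1] endv then i ^ 2 else i)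
        = fMem (fibLoopA (endv.toNat + 3) 0 1 [0, 1] endv) from rfl]
  conv_rhs => rw [h0, mark_map, mark_map]
  rw [sim]
  norm_num

-- ===== VERDICT (by name: the statement is the Claim_ definition above) =====
theorem fib_squares_spec : Claim_equal_fib_squares := by
  intro a b _
  show fib_squares a b = fib_squares_alt a b
  unfold fib_squares fib_squares_alt
  by_cases hb : b ≠ 0 <;> simp only [hb, if_neg, not_false_iff] <;> exact core _ _
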